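-- pv_equiv track=rewrite | github.com/Zhendong404/PTOAS | test/tilelang_st/script/run_all_st.py | resolve_split_testcases
-- ===== SOURCE A (Python) =====
-- def resolve_split_testcases(selected_testcases, requested, split_all_by_case):
--     if split_all_by_case:
--         return set(selected_testcases)
--
--     resolved = []
--     seen = set()
--     for testcase in requested:
--         if testcase in seen:
--             continue
--         if testcase not in selected_testcases:
--             raise ValueError(
--                 f"Unsupported split-by-case testcase(s): {testcase}; "
--                 f"selected: {', '.join(selected_testcases)}"
--             )
--         resolved.append(testcase)
--         seen.add(testcase)
--     return set(resolved)
-- ===== SOURCE B (Python) =====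
-- def resolve_split_testcases(selected_testcases, requested, split_all_by_case):
--     if split_all_by_case:
--         return set(selected_testcases)
--     requested_set = set(requested)
--     unsupported = requested_set.difference(selected_testcases)
--     if unsupported:
--         bad = next(t for t in requested if t in unsupported)
--         raise ValueError(
--             f"Unsupported split-by-case testcase(s): {bad}; "
--             f"selected: {', '.join(selected_testcases)}"
--         )
--     return requested_set
-- ===== Notes on version B (the rewrite author's own statement) =====
-- stated objective: alternative
-- what changed: Replaces A's interleaved loop (resolved list + seen set, one membership scan of selected_testcases per requested element) with set algebra: build set(requested) once and compute its set-difference with selected_testcases; an empty difference means valid and set(requested) is returned directly, otherwise the first offender in request order is reported.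
import Mathlib
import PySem

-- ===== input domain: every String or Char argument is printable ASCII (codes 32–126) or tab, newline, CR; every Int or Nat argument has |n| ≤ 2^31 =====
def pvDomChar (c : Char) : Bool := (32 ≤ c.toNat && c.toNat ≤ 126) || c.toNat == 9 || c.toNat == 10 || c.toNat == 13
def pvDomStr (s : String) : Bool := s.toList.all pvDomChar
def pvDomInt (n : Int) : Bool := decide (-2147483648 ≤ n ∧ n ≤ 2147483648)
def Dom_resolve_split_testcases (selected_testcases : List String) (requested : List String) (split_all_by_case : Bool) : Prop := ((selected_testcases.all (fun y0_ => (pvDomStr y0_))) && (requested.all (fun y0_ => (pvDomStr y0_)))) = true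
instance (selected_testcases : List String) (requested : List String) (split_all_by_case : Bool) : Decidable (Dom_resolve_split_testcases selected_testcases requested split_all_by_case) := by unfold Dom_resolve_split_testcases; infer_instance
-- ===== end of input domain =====

-- B replaces A's interleaved resolve-loop with hash-set algebra: set(requested) minus selected_testcases decides validity, and set(requested) is the result.


-- ===== PORT A =====
-- the for-loop of A: carries resolved (list) and seen (set); returns [] exactly where the
-- Python raises ValueError (those inputs are outside Pre_)
def pvALoop (selected_testcases : List String) : List String → List String → PySem.Set String → List String
  | [], resolved, _ => PySem.Set.ofList resolved
  | t :: rest, resolved, seen =>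
    if PySem.Set.contains seen t then
      pvALoop selected_testcases rest resolved seen
    else if ¬ (t ∈ selected_testcases) then
      []  -- raise ValueError (excluded by Pre_)
    else
      pvALoop selected_testcases rest (resolved ++ [t]) (PySem.Set.add seen t)

def resolve_split_testcases (selected_testcases : List String) (requested : List String) (split_all_by_case : Bool) : List String :=
  if split_all_by_case then
    PySem.Set.ofList selected_testcases
  else
    pvALoop selected_testcases requested [] PySem.Set.empty

-- ===== PORT B =====
def resolve_split_testcases_alt (selected_testcases : List String) (requested : List String) (split_all_by_case : Bool) : List String :=
  if split_all_by_case then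
    PySem.Set.ofList selected_testcases
  else
    let requestedSet := PySem.Set.ofList requested
    let unsupported := PySem.Set.diff requestedSet selected_testcases
    if unsupported ≠ [] then
      []  -- raise ValueError with the first offender in request order (excluded by Pre_)
    else
      requestedSet

-- ===== PRECONDITION & SPEC =====
-- Pre_ excludes exactly the inputs on which A raises ValueError: some requested testcase
-- is not in selected_testcases while split_all_by_case is false.
def Pre_resolve_split_testcases (selected_testcases : List String) (requested : List String) (split_all_by_case : Bool) : Prop :=
  split_all_by_case = true ∨ ∀ t ∈ requested, t ∈ selected_testcases
instance (selected_testcases : List String) (requested : List String) (split_all_by_case : Bool) : Decidable (Pre_resolve_split_testcases selected_testcases requested split_all_by_case) := by unfold Pre_resolve_split_testcases; infer_instance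

def pvWitness_resolve_split_testcases : List String × List String × Bool := (["x", "y"], ["y", "y", "x"], false)

def Spec_resolve_split_testcases (selected_testcases : List String) (requested : List String) (split_all_by_case : Bool) (out : List String) : Prop := out = resolve_split_testcases_alt selected_testcases requested split_all_by_case
instance (selected_testcases : List String) (requested : List String) (split_all_by_case : Bool) (out : List String) : Decidable (Spec_resolve_split_testcases selected_testcases requested split_all_by_case out) := by unfold Spec_resolve_split_testcases; infer_instance

-- ===== CLAIM (what is proved, stated in full; the proofs are below) =====
def Claim_equal_resolve_split_testcases : Prop := ∀ (selected_testcases : List String) (requested : List String) (split_all_by_case : Bool), Dom_resolve_split_testcases selected_testcases requested split_all_by_case → Pre_resolve_split_testcases selected_testcases requested split_all_by_case → Spec_resolve_split_testcases selected_testcases requested split_all_by_case (resolve_split_testcases selected_testcases requested split_all_by_case)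

-- ===== LEMMAS AND PROOFS =====

-- skipping an element already in the prefix does not change the resulting set
lemma ofList_append_cons_of_mem {α : Type} [BEq α] [LawfulBEq α] (xs ys : List α) (t : α)
    (h : t ∈ xs) : PySem.Set.ofList (xs ++ t :: ys) = PySem.Set.ofList (xs ++ ys) := by
  simp only [PySem.Set.ofList_eq_foldl, List.foldl_append, List.foldl_cons]
  rw [PySem.Set.add_of_mem]
  rw [← PySem.Set.ofList_eq_foldl, PySem.Set.mem_ofList]
  exact h

lemma ofList_of_nodup {α : Type} [BEq α] [LawfulBEq α] (xs : List α) (h : xs.Nodup) :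
    PySem.Set.ofList xs = xs := by
  induction xs with
  | nil => rfl
  | cons x xs ih =>
    have hx : x ∉ xs := (List.nodup_cons.mp h).1
    have hxs := (List.nodup_cons.mp h).2
    simp only [PySem.Set.ofList_eq_foldl, List.foldl_cons] at *
    have : PySem.Set.add ([] : PySem.Set α) x = [x] := rfl
    rw [this]
    have step : ∀ (ys : List α) (acc : PySem.Set α) (a : α), a ∉ ys →
        ys.foldl PySem.Set.add (a :: acc) = a :: ys.foldl PySem.Set.add acc := by
      intro ys
      induction ys with
      | nil => intro acc a _; rfl
      | cons y ys ihy =>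
        intro acc a ha
        simp only [List.foldl_cons]
        have hya : ¬ (y == a) = true := by
          simp only [beq_iff_eq]
          intro he; exact ha (he ▸ List.mem_cons_self)
        have hstep : PySem.Set.add (a :: acc) y = a :: PySem.Set.add acc y := by
          simp only [PySem.Set.add, PySem.Set.contains, List.contains_cons, hya,
            Bool.false_or]
          split_ifs <;> rfl
        rw [hstep]
        exact ihy (PySem.Set.add acc y) a (fun hm => ha (List.mem_cons_of_mem _ hm))
    rw [step xs [] x hx, ih hxs]

-- main invariant of A's loop under the precondition
lemma pvALoop_eq (sel : List String) (req : List String) :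
    (∀ t ∈ req, t ∈ sel) → ∀ (acc : List String) (seen : PySem.Set String),
    acc.Nodup → (∀ x, x ∈ seen ↔ x ∈ acc) →
    pvALoop sel req acc seen = PySem.Set.ofList (acc ++ req) := by
  induction req with
  | nil =>
    intro _ acc seen hnd _
    simp [pvALoop, ofList_of_nodup acc hnd]
  | cons t rest ih =>
    intro hall acc seen hnd hseen
    have ht : t ∈ sel := hall t List.mem_cons_self
    have hrest : ∀ x ∈ rest, x ∈ sel := fun x hx => hall x (List.mem_cons_of_mem _ hx)
    by_cases hmem : t ∈ acc
    · have hc : PySem.Set.contains seen t = true := by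
        rw [PySem.Set.contains_iff]; exact (hseen t).mpr hmem
      simp only [pvALoop, hc, if_pos]
      rw [ih hrest acc seen hnd hseen, ofList_append_cons_of_mem _ _ _ hmem]
    · have hc : ¬ PySem.Set.contains seen t = true := by
        rw [PySem.Set.contains_iff, hseen t]; exact hmem
      simp only [pvALoop, hc, if_neg, not_false_iff, ht, not_true]
      rw [ih hrest (acc ++ [t]) (PySem.Set.add seen t)
          (by simp [List.nodup_append, hnd]
              intro a ha he
              exact hmem (he ▸ ha))
          (by intro x
              rw [PySem.Set.mem_add, hseen x]
              simp [or_comm, eq_comm])]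
      simp

-- B's difference is empty exactly when every requested testcase is selected
lemma diff_eq_nil_of_all (sel req : List String) (hall : ∀ t ∈ req, t ∈ sel) :
    PySem.Set.diff (PySem.Set.ofList req) sel = [] := by
  rw [List.eq_nil_iff_forall_not_mem]
  intro x hx
  have := (PySem.Set.mem_diff _ _ _).mp hx
  exact this.2 (hall x ((PySem.Set.mem_ofList _ _).mp this.1))

-- ===== VERDICT (by name: the statement is the Claim_ definition above) =====
theorem resolve_split_testcases_spec : Claim_equal_resolve_split_testcases := by
  intro sel req flag _ hpre
  unfold Spec_resolve_split_testcases resolve_split_testcases resolve_split_testcases_alt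
  cases flag with
  | true => simp
  | false =>
    have hall : ∀ t ∈ req, t ∈ sel := by
      rcases hpre with h | h
      · exact absurd h (by simp)
      · exact h
    simp only [if_neg (by simp : ¬ (false = true)), diff_eq_nil_of_all sel req hall,
      ne_eq, not_true_eq_false, if_false]
    exact pvALoop_eq sel req hall [] PySem.Set.empty List.nodup_nil
      (by intro x; simp [PySem.Set.empty])
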